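-- pv_equiv track=rewrite | github.com/koii-network/prometheus-beta | src/fibonacci_arithmetic.py | fibonacci_arithmetic_progression
-- ===== SOURCE A (Python) =====
-- def fibonacci_arithmetic_progression(n):
--     """
--     Returns the first n numbers in the Fibonacci sequence that form an arithmetic progression.
--
--     An arithmetic progression is a sequence where the difference between
--     consecutive terms is constant.
--
--     Args:
--         n (int): The number of Fibonacci numbers to return that form an arithmetic progression.
--
--     Returns:
--         list: A list of n Fibonacci numbers forming an arithmetic progression.
--
--     Raises:
--         ValueError: If n is less than 3 (minimum required to form an arithmetic progression).
--         TypeError: If n is not an integer.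
--     """
--     # Input validation
--     if not isinstance(n, int):
--         raise TypeError("Input must be an integer")
--
--     if n < 3:
--         raise ValueError("At least 3 numbers are required to form an arithmetic progression")
--
--     # Initialize Fibonacci sequence
--     fib = [0, 1]
--
--     # Generate Fibonacci sequence
--     while len(fib) < n * 2:  # Generate more numbers to find potential arithmetic progressions
--         fib.append(fib[-1] + fib[-2])
--
--     # Check for arithmetic progressions
--     for start in range(len(fib) - n + 1):
--         # Try sliding window of n numbers
--         window = fib[start:start+n]
--
--         # Check if these numbers form an arithmetic progression
--         differences = [window[i+1] - window[i] for i in range(len(window)-1)]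
--
--         if len(set(differences)) == 1:
--             return window
--
--     # If no arithmetic progression found
--     return []
-- ===== SOURCE B (Python) =====
-- def fibonacci_arithmetic_progression(n):
--     if not isinstance(n, int):
--         raise TypeError("Input must be an integer")
--     if n < 3:
--         raise ValueError("At least 3 numbers are required to form an arithmetic progression")
--     # Maths: among consecutive Fibonacci numbers (seeded 0, 1) the only run of
--     # length >= 3 in arithmetic progression is 1, 2, 3 (for s >= 2 the window's
--     # consecutive differences are themselves consecutive Fibonacci numbers and
--     # strictly increase; the seeds rule out earlier windows).  So A's scan can
--     # only ever succeed for n == 3, with window [1, 2, 3].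
--     return [1, 2, 3] if n == 3 else []
-- ===== Notes on version B (the rewrite author's own statement) =====
-- stated objective: faster
-- what changed: Replaced the Fibonacci-list generation plus sliding-window arithmetic-progression scan by the closed-form answer: the only run of >=3 consecutive Fibonacci numbers in arithmetic progression is [1,2,3], so return it for n==3 and [] otherwise.
import Mathlib
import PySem

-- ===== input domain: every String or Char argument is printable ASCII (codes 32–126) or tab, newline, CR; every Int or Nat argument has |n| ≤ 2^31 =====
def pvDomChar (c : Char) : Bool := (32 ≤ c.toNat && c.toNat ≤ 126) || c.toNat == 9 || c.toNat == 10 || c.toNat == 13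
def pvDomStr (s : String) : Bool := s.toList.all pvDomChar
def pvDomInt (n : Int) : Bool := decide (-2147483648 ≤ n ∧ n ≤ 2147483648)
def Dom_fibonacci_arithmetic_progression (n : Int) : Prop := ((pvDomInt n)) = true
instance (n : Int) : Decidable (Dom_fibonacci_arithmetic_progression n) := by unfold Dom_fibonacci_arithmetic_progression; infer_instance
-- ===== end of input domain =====

-- B replaces A's generate-2n-Fibonacci-numbers-and-scan-all-windows search by the
-- closed-form answer ([1,2,3] for n == 3, else []); objective: faster (asymptotic).

-- ===== PORT A =====
-- the while loop: each iteration appends fib[-1] + fib[-2]; the list always has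
-- ≥ 2 elements, so the pyGetD defaults are never consulted
def pvGen (fib : List Int) : Nat → List Int
  | 0 => fib
  | m + 1 =>
      pvGen (fib ++ [PySem.List.pyGetD fib (-1) 0 + PySem.List.pyGetD fib (-2) 0]) m

-- window = fib[start:start+n]
def pvWindow (fib : List Int) (n s : Int) : List Int :=
  PySem.List.slice fib (some s) (some (s + n))

-- differences = [window[i+1] - window[i] for i in range(len(window)-1)]
def pvDiffs (w : List Int) : List Int :=
  (PySem.List.pyRange 0 ((w.length : Int) - 1) 1).map
    (fun i => PySem.List.pyGetD w (i + 1) 0 - PySem.List.pyGetD w i 0)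

-- the for-start loop: first window whose set of consecutive differences has one element
def pvScan (fib : List Int) (n : Int) : List Int → List Int
  | [] => []
  | s :: rest =>
      let window := pvWindow fib n s
      let diffs := pvDiffs window
      if (PySem.Set.ofList diffs).length = 1 then window else pvScan fib n rest

def fibonacci_arithmetic_progression (n : Int) : List Int :=
  if n < 3 then []  -- A raises ValueError here; excluded by Pre_
  else
    let fib := pvGen [0, 1] (n * 2 - 2).toNat
    pvScan fib n (PySem.List.pyRange 0 ((fib.length : Int) - n + 1) 1)

-- ===== PORT B =====
def fibonacci_arithmetic_progression_alt (n : Int) : List Int :=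
  if n < 3 then []  -- B raises ValueError here; excluded by Pre_
  else if n = 3 then [1, 2, 3] else []

-- ===== PRECONDITION & SPEC =====
-- A raises ValueError for n < 3; Pre_ excludes exactly those inputs.
def Pre_fibonacci_arithmetic_progression (n : Int) : Prop := 3 ≤ n
instance (n : Int) : Decidable (Pre_fibonacci_arithmetic_progression n) := by
  unfold Pre_fibonacci_arithmetic_progression; infer_instance
def pvWitness_fibonacci_arithmetic_progression : Int := (3)

def Spec_fibonacci_arithmetic_progression (n : Int) (out : List Int) : Prop := out = fibonacci_arithmetic_progression_alt n
instance (n : Int) (out : List Int) : Decidable (Spec_fibonacci_arithmetic_progression n out) := by unfold Spec_fibonacci_arithmetic_progression; infer_instance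

-- ===== CLAIM (what is proved, stated in full; the proofs are below) =====
def Claim_equal_fibonacci_arithmetic_progression : Prop := ∀ (n : Int), Dom_fibonacci_arithmetic_progression n → Pre_fibonacci_arithmetic_progression n → Spec_fibonacci_arithmetic_progression n (fibonacci_arithmetic_progression n)

-- ===== LEMMAS AND PROOFS =====

def pvFib (k : Nat) : Int := (Nat.fib k : Int)

theorem pvGen_spec (m k : Nat) (hk : 2 ≤ k) :
    pvGen ((List.range k).map pvFib) m = (List.range (k + m)).map pvFib := by
  induction m generalizing k with
  | zero => rw [pvGen, Nat.add_zero]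
  | succ m ih =>
      rw [pvGen]
      obtain ⟨j, rfl⟩ : ∃ j, k = j + 2 := ⟨k - 2, by omega⟩
      have h1 : PySem.List.pyGetD ((List.range (j + 2)).map pvFib) (-1) 0 = pvFib (j + 1) := by
        rw [PySem.List.pyGetD_neg_ofNat _ 1 0 (by omega) (by simp)]
        simp
      have h2 : PySem.List.pyGetD ((List.range (j + 2)).map pvFib) (-2) 0 = pvFib j := by
        rw [PySem.List.pyGetD_neg_ofNat _ 2 0 (by omega) (by simp)]
        simp
      have hf : pvFib (j + 1) + pvFib j = pvFib (j + 2) := by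
        unfold pvFib
        rw [Nat.fib_add_two]
        push_cast
        ring
      have happ : (List.range (j + 2)).map pvFib ++ [pvFib (j + 1) + pvFib j]
          = (List.range (j + 3)).map pvFib := by
        rw [hf]
        simp [List.range_succ]
      rw [h1, h2, happ, ih (j + 3) (by omega),
        show j + 3 + m = j + 2 + (m + 1) from by omega]

theorem pvScan_nil (fib : List Int) (n : Int) (starts : List Int)
    (h : ∀ s ∈ starts, (PySem.Set.ofList (pvDiffs (pvWindow fib n s))).length ≠ 1) :
    pvScan fib n starts = [] := by
  induction starts with
  | nil => rw [pvScan]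
  | cons s rest ih =>
      rw [pvScan]
      simp only [if_neg (h s (List.mem_cons_self ..))]
      exact ih (fun t ht => h t (List.mem_cons_of_mem _ ht))

theorem pvWindow_eq (L : Nat) (n : Int) (hn : 0 ≤ n) (sn : Nat)
    (hs : sn + n.toNat ≤ L) :
    pvWindow ((List.range L).map pvFib) n (sn : Int)
      = (List.range n.toNat).map (fun k => pvFib (sn + k)) := by
  unfold pvWindow
  rw [show n = ((n.toNat : Nat) : Int) from (Int.toNat_of_nonneg hn).symm,
    PySem.List.slice_natCast_add]
  apply List.ext_getElem
  · simp; omega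
  · intro i h1 h2
    simp only [List.getElem_take, List.getElem_drop, List.getElem_map, List.getElem_range]

theorem pvDiffs_eq (L : Nat) (n : Int) (hn : 3 ≤ n) (sn : Nat)
    (hs : sn + n.toNat ≤ L) :
    pvDiffs (pvWindow ((List.range L).map pvFib) n (sn : Int))
      = (List.range (n.toNat - 1)).map (fun k => pvFib (sn + (k + 1)) - pvFib (sn + k)) := by
  rw [pvWindow_eq L n (by omega) sn hs]
  unfold pvDiffs
  have hlen : ((List.range n.toNat).map (fun k => pvFib (sn + k))).length = n.toNat := by simp
  rw [hlen, show ((n.toNat : Int) - 1) = ((n.toNat - 1 : Nat) : Int) from by omega,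
    PySem.List.pyRange_zero_natCast, List.map_map]
  apply List.map_congr_left
  intro k hk
  have hk' : k < n.toNat - 1 := List.mem_range.mp hk
  simp only [Function.comp]
  rw [show ((k : Int) + 1) = ((k + 1 : Nat) : Int) from by push_cast; ring]
  rw [PySem.List.pyGetD_natCast, PySem.List.pyGetD_natCast,
    List.getD_eq_getElem _ _ (by simp; omega), List.getD_eq_getElem _ _ (by simp; omega)]
  simp

theorem pvSet_len_ne_one {a b : Int} {l : List Int} (ha : a ∈ l) (hb : b ∈ l)
    (hab : a ≠ b) : (PySem.Set.ofList l).length ≠ 1 := by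
  intro h
  obtain ⟨x, hx⟩ := List.length_eq_one_iff.mp h
  have ha' : a ∈ PySem.Set.ofList l := (PySem.Set.mem_ofList _ _).mpr ha
  have hb' : b ∈ PySem.Set.ofList l := (PySem.Set.mem_ofList _ _).mpr hb
  rw [hx] at ha' hb'
  simp at ha' hb'
  exact hab (ha'.trans hb'.symm)

theorem pvFib_diff (m : Nat) : pvFib (m + 2) - pvFib (m + 1) = pvFib m := by
  unfold pvFib
  rw [Nat.fib_add_two]
  push_cast
  ring

theorem pvCond_fails (L : Nat) (n : Int) (hn : 4 ≤ n) (sn : Nat)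
    (hs : sn + n.toNat ≤ L) :
    (PySem.Set.ofList (pvDiffs (pvWindow ((List.range L).map pvFib) n (sn : Int)))).length ≠ 1 := by
  rw [pvDiffs_eq L n (by omega) sn hs]
  have hmem : ∀ k, k < n.toNat - 1 →
      (pvFib (sn + (k + 1)) - pvFib (sn + k)) ∈
        (List.range (n.toNat - 1)).map (fun k => pvFib (sn + (k + 1)) - pvFib (sn + k)) :=
    fun k hk => List.mem_map.mpr ⟨k, List.mem_range.mpr hk, rfl⟩
  have hnn : 3 ≤ n.toNat - 1 := by omega
  rcases Nat.lt_or_ge sn 2 with hsn | hsn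
  · -- sn = 0 or 1: the first two differences differ (1,0 or 0,1)
    refine pvSet_len_ne_one (hmem 0 (by omega)) (hmem 1 (by omega)) ?_
    interval_cases sn <;> decide
  · -- sn ≥ 2: differences at indices 1 and 2 are fib sn < fib (sn+1)
    refine pvSet_len_ne_one (hmem 1 (by omega)) (hmem 2 (by omega)) ?_
    rw [show sn + (1 + 1) = sn + 2 from by omega, show sn + 1 + 1 = sn + 2 from rfl] at *
    rw [show sn + (2 + 1) = sn + 1 + 2 from by omega, show sn + 2 = sn + 1 + 1 from rfl,
      pvFib_diff sn, pvFib_diff (sn + 1)]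
    have := Nat.fib_lt_fib_succ hsn
    unfold pvFib
    omega

-- ===== VERDICT (by name: the statement is the Claim_ definition above) =====
theorem fibonacci_arithmetic_progression_spec : Claim_equal_fibonacci_arithmetic_progression := by
  intro n _ hpre
  unfold Pre_fibonacci_arithmetic_progression at hpre
  unfold Spec_fibonacci_arithmetic_progression
  by_cases h3 : n = 3
  · subst h3; decide
  · have hn : 4 ≤ n := by omega
    unfold fibonacci_arithmetic_progression fibonacci_arithmetic_progression_alt
    rw [if_neg (by omega), if_neg (by omega), if_neg h3]
    have h01 : ([0, 1] : List Int) = (List.range 2).map pvFib := by decide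
    have hL : pvGen [0, 1] (n * 2 - 2).toNat = (List.range (2 * n).toNat).map pvFib := by
      rw [h01, pvGen_spec _ 2 le_rfl, show 2 + (n * 2 - 2).toNat = (2 * n).toNat from by omega]
    rw [hL]
    apply pvScan_nil
    intro s hsmem
    have hsr := PySem.List.mem_pyRange_one.mp hsmem
    simp only [List.length_map, List.length_range] at hsr
    obtain ⟨sn, rfl⟩ : ∃ sn : Nat, s = (sn : Int) := ⟨s.toNat, (Int.toNat_of_nonneg hsr.1).symm⟩
    exact pvCond_fails (2 * n).toNat n hn sn (by omega)
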